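-- pv_equiv track=rewrite | github.com/Toroto006/InfoSecLab-ETHZ-HS21 | Module4/Task3/t1/submit_3_1.py | blocking_on
-- ===== SOURCE A (Python) =====
-- def blocking_on(addresses, stop_block):
--     blocks = []
--     block = []
--     for add in addresses:
--         block.append(add)
--         if stop_block.lower() in add:
--             blocks.append(block)
--             block = []
--     blocks.append(block)
--     return blocks
-- ===== SOURCE B (Python) =====
-- def blocking_on(addresses, stop_block):
--     marker = stop_block.lower()
--     blocks = []
--     start = 0
--     for i, add in enumerate(addresses):
--         if marker in add:
--             blocks.append(addresses[start:i + 1])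
--             start = i + 1
--     blocks.append(addresses[start:])
--     return blocks
-- ===== Notes on version B (the rewrite author's own statement) =====
-- stated objective: faster
-- what changed: B tracks a running start index and emits each block as a slice addresses[start:i+1] at every marker element (plus the trailing slice), instead of A's explicitly accumulated current-block list flushed on each marker; B also lowercases stop_block once instead of per element.
import Mathlib
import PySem

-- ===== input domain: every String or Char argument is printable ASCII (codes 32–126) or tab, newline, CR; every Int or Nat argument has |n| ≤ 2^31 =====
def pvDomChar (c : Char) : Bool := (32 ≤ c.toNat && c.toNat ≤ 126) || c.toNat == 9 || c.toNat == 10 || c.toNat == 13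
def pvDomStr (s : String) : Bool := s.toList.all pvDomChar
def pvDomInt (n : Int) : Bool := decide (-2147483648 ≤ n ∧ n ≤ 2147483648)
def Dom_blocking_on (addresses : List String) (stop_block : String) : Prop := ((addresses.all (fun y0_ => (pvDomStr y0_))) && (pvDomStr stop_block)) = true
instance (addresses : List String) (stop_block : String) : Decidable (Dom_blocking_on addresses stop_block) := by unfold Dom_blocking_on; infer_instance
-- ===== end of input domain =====

-- B emits blocks as slices addresses[start:i+1] at a running start index instead of
-- A's explicitly accumulated current-block list; an alternative decomposition of the same pass.


-- ===== PORT A =====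
-- state = (blocks, block); per element: append to block, flush on marker; finally append block
def blocking_on (addresses : List String) (stop_block : String) : List (List String) :=
  let st := addresses.foldl
    (fun (st : List (List String) × List String) add =>
      let block := st.2 ++ [add]
      if PySem.Str.isIn (PySem.Str.lower stop_block) add then (st.1 ++ [block], [])
      else (st.1, block))
    ([], [])
  st.1 ++ [st.2]

-- ===== PORT B =====
-- state = (blocks, start); on a marker at index i append the slice addresses[start:i+1]
-- and set start = i+1; finally append the trailing slice addresses[start:]
def blocking_on_alt (addresses : List String) (stop_block : String) : List (List String) :=
  let marker := PySem.Str.lower stop_block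
  let st := (PySem.List.enumerate addresses).foldl
    (fun (st : List (List String) × Int) (p : Int × String) =>
      if PySem.Str.isIn marker p.2 then
        (st.1 ++ [PySem.List.slice addresses (some st.2) (some (p.1 + 1))], p.1 + 1)
      else st)
    ([], 0)
  st.1 ++ [PySem.List.slice addresses (some st.2) none]

-- ===== PRECONDITION & SPEC =====
def Spec_blocking_on (addresses : List String) (stop_block : String) (out : List (List String)) : Prop := out = blocking_on_alt addresses stop_block
instance (addresses : List String) (stop_block : String) (out : List (List String)) : Decidable (Spec_blocking_on addresses stop_block out) := by unfold Spec_blocking_on; infer_instance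

-- ===== CLAIM (what is proved, stated in full; the proofs are below) =====
def Claim_equal_blocking_on : Prop := ∀ (addresses : List String) (stop_block : String), Dom_blocking_on addresses stop_block → Spec_blocking_on addresses stop_block (blocking_on addresses stop_block)

-- ===== LEMMAS AND PROOFS =====

-- reference: structural recursion producing the same block list
def pvBlocksRef (p : String → Bool) : List String → List (List String)
  | [] => [[]]
  | a :: t =>
    if p a then [a] :: pvBlocksRef p t
    else match pvBlocksRef p t with
      | b :: bs => (a :: b) :: bs
      | [] => [[a]]

theorem pvBlocksRef_ne_nil (p : String → Bool) (l : List String) : pvBlocksRef p l ≠ [] := by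
  cases l with
  | nil => simp [pvBlocksRef]
  | cons a t =>
    simp only [pvBlocksRef]
    split
    · simp
    · cases h : pvBlocksRef p t <;> simp

-- prepend a list onto the head block
def pvConsHead (b : List String) : List (List String) → List (List String)
  | h :: t => (b ++ h) :: t
  | [] => [b]

theorem blocking_on_A_eq_ref (stop_block : String) (l : List String)
    (blocks : List (List String)) (block : List String) :
    (let st := l.foldl
      (fun (st : List (List String) × List String) add =>
        let blk := st.2 ++ [add]
        if PySem.Str.isIn (PySem.Str.lower stop_block) add then (st.1 ++ [blk], [])
        else (st.1, blk))
      (blocks, block)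
     st.1 ++ [st.2]) =
    blocks ++ pvConsHead block (pvBlocksRef (fun a => PySem.Str.isIn (PySem.Str.lower stop_block) a) l) := by
  induction l generalizing blocks block with
  | nil => simp [pvConsHead, pvBlocksRef]
  | cons a t ih =>
    simp only [List.foldl_cons, pvBlocksRef]
    by_cases hp : PySem.Str.isIn (PySem.Str.lower stop_block) a
    · simp only [hp, if_true, ih]
      cases h : pvBlocksRef (fun a => PySem.Str.isIn (PySem.Str.lower stop_block) a) t with
      | nil => exact absurd h (pvBlocksRef_ne_nil _ _)
      | cons b bs => simp [pvConsHead]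
    · simp only [hp, ih]
      cases h : pvBlocksRef (fun a => PySem.Str.isIn (PySem.Str.lower stop_block) a) t with
      | nil => exact absurd h (pvBlocksRef_ne_nil _ _)
      | cons b bs => simp [pvConsHead]

-- empty prefix prepended onto a nonempty block list is the block list itself
theorem pvConsHead_nil_of_ne_nil (bs : List (List String)) (h : bs ≠ []) :
    pvConsHead [] bs = bs := by
  cases bs with
  | nil => exact absurd rfl h
  | cons b t => simp [pvConsHead]

-- B's fold invariant: processing the suffix at offset k with running start s yields the
-- accumulated blocks, the pending slice l[s:k] prepended onto the suffix's first block
theorem blocking_on_B_invariant (p : String → Bool) (l : List String) :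
    ∀ (suf : List String) (k : Nat) (acc : List (List String)) (s : Nat),
    l.drop k = suf → s ≤ k →
    (((PySem.List.enumerate suf (k : Int)).foldl
        (fun (st : List (List String) × Int) (q : Int × String) =>
          if p q.2 then
            (st.1 ++ [PySem.List.slice l (some st.2) (some (q.1 + 1))], q.1 + 1)
          else st)
        (acc, (s : Int))).1
      ++ [PySem.List.slice l
            (some (((PySem.List.enumerate suf (k : Int)).foldl
              (fun (st : List (List String) × Int) (q : Int × String) =>
                if p q.2 then
                  (st.1 ++ [PySem.List.slice l (some st.2) (some (q.1 + 1))], q.1 + 1)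
                else st)
              (acc, (s : Int))).2)) none])
    = acc ++ pvConsHead ((l.drop s).take (k - s)) (pvBlocksRef p suf) := by
  intro suf
  induction suf with
  | nil =>
    intro k acc s hk hs
    have hlen : l.length ≤ k := by
      have := congrArg List.length hk; simp at this; omega
    simp only [PySem.List.enumerate_nil, List.foldl_nil, pvBlocksRef, pvConsHead,
      PySem.List.slice_from_natCast]
    have : (l.drop s).take (k - s) = l.drop s := by
      apply List.take_of_length_le; simp; omega
    simp [this]
  | cons a t ih =>
    intro k acc s hk hs
    have hkl : k < l.length := by
      have := congrArg List.length hk; simp at this; omega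
    have hka : l[k]? = some a := by
      have h0 : (l.drop k)[0]? = l[k]? := by simp
      rw [hk] at h0; simpa using h0.symm
    have hdt : l.drop (k + 1) = t := by
      have h1 : l.drop (k + 1) = (l.drop k).tail := by rw [List.tail_drop]
      rw [h1, hk]; rfl
    have htake : (l.drop s).take (k + 1 - s) = (l.drop s).take (k - s) ++ [a] := by
      have h1 : k + 1 - s = (k - s) + 1 := by omega
      rw [h1, List.take_add_one, List.getElem?_drop]
      have h2 : s + (k - s) = k := by omega
      rw [h2, hka]; rfl
    have hcast : ((k : Int) + 1) = ((k + 1 : Nat) : Int) := by push_cast; ring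
    simp only [PySem.List.enumerate_cons, List.foldl_cons]
    by_cases hp : p a
    · simp only [hp, if_true, hcast]
      rw [ih (k + 1) _ (k + 1) hdt (le_refl _)]
      simp only [Nat.sub_self, List.take_zero,
        pvConsHead_nil_of_ne_nil _ (pvBlocksRef_ne_nil p t),
        pvBlocksRef, hp, if_true, PySem.List.slice_natCast, htake]
      simp [pvConsHead]
    · simp only [hp, Bool.false_eq_true, if_false, hcast]
      rw [ih (k + 1) acc s hdt (by omega)]
      simp only [htake]
      cases h : pvBlocksRef p t with
      | nil => exact absurd h (pvBlocksRef_ne_nil _ _)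
      | cons b bs => simp [pvBlocksRef, hp, h, pvConsHead]

theorem blocking_on_B_eq_ref (stop_block : String) (l : List String) :
    blocking_on_alt l stop_block =
      pvBlocksRef (fun a => PySem.Str.isIn (PySem.Str.lower stop_block) a) l := by
  unfold blocking_on_alt
  have h := blocking_on_B_invariant
    (fun a => PySem.Str.isIn (PySem.Str.lower stop_block) a) l l 0 [] 0 rfl (le_refl _)
  simp only [Nat.cast_zero] at h
  rw [h]
  simp only [Nat.sub_zero, List.take_zero, List.drop_zero, List.nil_append]
  cases hb : pvBlocksRef (fun a => PySem.Str.isIn (PySem.Str.lower stop_block) a) l with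
  | nil => exact absurd hb (pvBlocksRef_ne_nil _ _)
  | cons b bs => simp [pvConsHead]

-- ===== VERDICT (by name: the statement is the Claim_ definition above) =====
theorem blocking_on_spec : Claim_equal_blocking_on := by
  intro addresses stop_block _
  unfold Spec_blocking_on blocking_on
  rw [blocking_on_B_eq_ref]
  have h := blocking_on_A_eq_ref stop_block addresses [] []
  rw [h, List.nil_append, pvConsHead_nil_of_ne_nil _ (pvBlocksRef_ne_nil _ _)]
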